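-- pv_equiv track=rewrite | github.com/VulcanLab/MCPThreatHive | core/mcp_knowledge_base.py | _map_to_stride
-- ===== SOURCE A (Python) =====
-- def _map_to_stride(threat_category: str, description: str) -> str:
--     """Map threat category to STRIDE category"""
--     text = f"{threat_category} {description}".lower()
--
--     if any(kw in text for kw in ['spoof', 'impersonat', 'fake', 'masquerade']):
--         return 'Spoofing'
--     elif any(kw in text for kw in ['tamper', 'modify', 'alter', 'inject', 'manipulate']):
--         return 'Tampering'
--     elif any(kw in text for kw in ['repudiat', 'deny', 'audit', 'log']):
--         return 'Repudiation'
--     elif any(kw in text for kw in ['disclosur', 'leak', 'expose', 'exfiltrat']):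
--         return 'Information Disclosure'
--     elif any(kw in text for kw in ['denial', 'dos', 'flood', 'exhaust', 'crash']):
--         return 'Denial of Service'
--     elif any(kw in text for kw in ['elevat', 'privilege', 'escalat', 'bypass']):
--         return 'Elevation of Privilege'
--     else:
--         return 'Tampering'  # Default
-- ===== SOURCE B (Python) =====
-- # Flattened keyword->priority table: scan all keywords once, collect the
-- # priorities of every matching keyword, and return the category of the
-- # minimum priority (no per-category branching, no short-circuit).
-- CATEGORIES = ['Spoofing', 'Tampering', 'Repudiation',
--               'Information Disclosure', 'Denial of Service',
--               'Elevation of Privilege']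
--
-- KEYWORD_TABLE = [
--     ('spoof', 0), ('impersonat', 0), ('fake', 0), ('masquerade', 0),
--     ('tamper', 1), ('modify', 1), ('alter', 1), ('inject', 1), ('manipulate', 1),
--     ('repudiat', 2), ('deny', 2), ('audit', 2), ('log', 2),
--     ('disclosur', 3), ('leak', 3), ('expose', 3), ('exfiltrat', 3),
--     ('denial', 4), ('dos', 4), ('flood', 4), ('exhaust', 4), ('crash', 4),
--     ('elevat', 5), ('privilege', 5), ('escalat', 5), ('bypass', 5),
-- ]
--
-- def _map_to_stride(threat_category: str, description: str) -> str:
--     text = f"{threat_category} {description}".lower()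
--     hits = [p for kw, p in KEYWORD_TABLE if kw in text]
--     return CATEGORIES[min(hits)] if hits else 'Tampering'
-- ===== Notes on version B (the rewrite author's own statement) =====
-- stated objective: alternative
-- what changed: Replaces the ordered if/elif first-match chain with one exhaustive scan of a flattened keyword->priority table that collects every matching keyword's priority and indexes CATEGORIES by the minimum (collect-then-minimize instead of short-circuit branching).
import Mathlib
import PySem

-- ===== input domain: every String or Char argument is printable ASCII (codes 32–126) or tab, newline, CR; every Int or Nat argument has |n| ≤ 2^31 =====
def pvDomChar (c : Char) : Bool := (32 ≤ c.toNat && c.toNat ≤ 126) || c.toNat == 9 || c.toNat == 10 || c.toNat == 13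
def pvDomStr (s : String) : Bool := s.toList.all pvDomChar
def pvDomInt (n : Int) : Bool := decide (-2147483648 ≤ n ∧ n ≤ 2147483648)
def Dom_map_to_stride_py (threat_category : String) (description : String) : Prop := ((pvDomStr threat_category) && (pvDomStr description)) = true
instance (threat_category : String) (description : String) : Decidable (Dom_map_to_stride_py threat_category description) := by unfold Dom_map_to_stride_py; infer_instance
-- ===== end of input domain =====

-- B replaces the if/elif chain by one scan of a flattened keyword->priority table: it collects
-- the priorities of ALL matching keywords and returns the category of the minimum (alternative; same cost).


-- ===== PORT A =====
def map_to_stride_py (threat_category : String) (description : String) : String :=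
  let text := PySem.Str.lower (PySem.Str.join " " [threat_category, description])
  if (["spoof", "impersonat", "fake", "masquerade"] : List String).any (fun kw => PySem.Str.isIn kw text) then "Spoofing"
  else if (["tamper", "modify", "alter", "inject", "manipulate"] : List String).any (fun kw => PySem.Str.isIn kw text) then "Tampering"
  else if (["repudiat", "deny", "audit", "log"] : List String).any (fun kw => PySem.Str.isIn kw text) then "Repudiation"
  else if (["disclosur", "leak", "expose", "exfiltrat"] : List String).any (fun kw => PySem.Str.isIn kw text) then "Information Disclosure"
  else if (["denial", "dos", "flood", "exhaust", "crash"] : List String).any (fun kw => PySem.Str.isIn kw text) then "Denial of Service"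
  else if (["elevat", "privilege", "escalat", "bypass"] : List String).any (fun kw => PySem.Str.isIn kw text) then "Elevation of Privilege"
  else "Tampering"

-- ===== PORT B =====
def strideCategories : List String :=
  ["Spoofing", "Tampering", "Repudiation", "Information Disclosure",
   "Denial of Service", "Elevation of Privilege"]

def strideKeywordTable : List (String × Int) :=
  [("spoof", 0), ("impersonat", 0), ("fake", 0), ("masquerade", 0),
   ("tamper", 1), ("modify", 1), ("alter", 1), ("inject", 1), ("manipulate", 1),
   ("repudiat", 2), ("deny", 2), ("audit", 2), ("log", 2),
   ("disclosur", 3), ("leak", 3), ("expose", 3), ("exfiltrat", 3),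
   ("denial", 4), ("dos", 4), ("flood", 4), ("exhaust", 4), ("crash", 4),
   ("elevat", 5), ("privilege", 5), ("escalat", 5), ("bypass", 5)]

def map_to_stride_py_alt (threat_category : String) (description : String) : String :=
  let text := PySem.Str.lower (PySem.Str.join " " [threat_category, description])
  let hits := (strideKeywordTable.filter (fun p => PySem.Str.isIn p.1 text)).map Prod.snd
  match PySem.List.min? hits (fun x => x) with
  | some m => (PySem.List.pyGet? strideCategories m).getD "Tampering"  -- CATEGORIES[min(hits)] (index always in range)
  | none => "Tampering"

-- ===== PRECONDITION & SPEC =====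
def Spec_map_to_stride_py (threat_category : String) (description : String) (out : String) : Prop := out = map_to_stride_py_alt threat_category description
instance (threat_category : String) (description : String) (out : String) : Decidable (Spec_map_to_stride_py threat_category description out) := by unfold Spec_map_to_stride_py; infer_instance

-- ===== CLAIM (what is proved, stated in full; the proofs are below) =====
def Claim_equal_map_to_stride_py : Prop := ∀ (threat_category : String) (description : String), Dom_map_to_stride_py threat_category description → Spec_map_to_stride_py threat_category description (map_to_stride_py threat_category description)

-- ===== LEMMAS AND PROOFS =====

-- tagged flattening of keyword groups, and the "first group with a hit" function (proof helpers)
def flatTag : Int → List (List String) → List (String × Int)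
  | _, [] => []
  | n, g :: gs => g.map (fun kw => (kw, n)) ++ flatTag (n + 1) gs

def firstHit (P : String → Bool) : Int → List (List String) → Option Int
  | _, [] => none
  | n, g :: gs => if g.any P then some n else firstHit P (n + 1) gs

def strideGroups : List (List String) :=
  [["spoof", "impersonat", "fake", "masquerade"],
   ["tamper", "modify", "alter", "inject", "manipulate"],
   ["repudiat", "deny", "audit", "log"],
   ["disclosur", "leak", "expose", "exfiltrat"],
   ["denial", "dos", "flood", "exhaust", "crash"],
   ["elevat", "privilege", "escalat", "bypass"]]

theorem strideKeywordTable_eq : strideKeywordTable = flatTag 0 strideGroups := by decide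

theorem flatTag_snd_ge (n : Int) (gs : List (List String)) :
    ∀ p ∈ flatTag n gs, n ≤ p.2 := by
  induction gs generalizing n with
  | nil => intro p h; simp [flatTag] at h
  | cons g gs ih =>
    intro p hp
    simp only [flatTag, List.mem_append, List.mem_map] at hp
    rcases hp with ⟨kw, _, rfl⟩ | hp
    · exact le_refl n
    · have := ih (n + 1) p hp; omega

theorem filter_map_tag (P : String → Bool) (n : Int) (g : List String) :
    ((g.map (fun kw => (kw, n))).filter (fun p => P p.1)).map Prod.snd
      = List.replicate (g.filter P).length n := by
  induction g with
  | nil => rfl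
  | cons kw g ih =>
    simp only [List.map_cons, List.filter_cons]
    by_cases h : P kw = true
    · simp [h, ih, List.replicate_succ]
    · simp [h, ih]

theorem foldl_min_eq (n : Int) (l : List Int) (h : ∀ y ∈ l, n ≤ y) : l.foldl min n = n := by
  induction l generalizing n with
  | nil => rfl
  | cons a l ih =>
    simp only [List.foldl_cons]
    have hna : n ≤ a := h a (List.mem_cons_self ..)
    rw [min_eq_left hna]
    exact ih n (fun y hy => h y (List.mem_cons_of_mem _ hy))

theorem min?_hits (P : String → Bool) (n : Int) (gs : List (List String)) :
    PySem.List.min? (((flatTag n gs).filter (fun p => P p.1)).map Prod.snd) (fun x => x)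
      = firstHit P n gs := by
  induction gs generalizing n with
  | nil => rfl
  | cons g gs ih =>
    simp only [flatTag, firstHit, List.filter_append, List.map_append, filter_map_tag]
    by_cases h : g.any P = true
    · rw [if_pos h]
      obtain ⟨kw, hkw, hin⟩ := List.any_eq_true.mp h
      have hk : (g.filter P).length ≠ 0 := by
        intro h0
        have h1 := List.eq_nil_of_length_eq_zero h0
        have h2 : kw ∈ g.filter P := List.mem_filter.mpr ⟨hkw, hin⟩
        simp_all
      obtain ⟨k, hkeq⟩ : ∃ k, (g.filter P).length = k + 1 :=
        ⟨_, (Nat.succ_pred_eq_of_ne_zero hk).symm⟩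
      rw [hkeq, List.replicate_succ, List.cons_append, PySem.List.min?_id_cons]
      congr 1
      apply foldl_min_eq
      intro y hy
      rcases List.mem_append.mp hy with hy | hy
      · rw [List.eq_of_mem_replicate hy]
      · obtain ⟨p, hp, rfl⟩ := List.mem_map.mp hy
        have := flatTag_snd_ge (n + 1) gs p (List.mem_of_mem_filter hp)
        omega
    · rw [if_neg h]
      have hnil : g.filter P = [] := by
        rw [List.filter_eq_nil_iff]
        intro kw hkw hin
        exact h (List.any_eq_true.mpr ⟨kw, hkw, hin⟩)
      rw [hnil]
      simpa using ih (n + 1)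

theorem main_eq (t : String) :
    (if (["spoof", "impersonat", "fake", "masquerade"] : List String).any (fun kw => PySem.Str.isIn kw t) then "Spoofing"
     else if (["tamper", "modify", "alter", "inject", "manipulate"] : List String).any (fun kw => PySem.Str.isIn kw t) then "Tampering"
     else if (["repudiat", "deny", "audit", "log"] : List String).any (fun kw => PySem.Str.isIn kw t) then "Repudiation"
     else if (["disclosur", "leak", "expose", "exfiltrat"] : List String).any (fun kw => PySem.Str.isIn kw t) then "Information Disclosure"
     else if (["denial", "dos", "flood", "exhaust", "crash"] : List String).any (fun kw => PySem.Str.isIn kw t) then "Denial of Service"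
     else if (["elevat", "privilege", "escalat", "bypass"] : List String).any (fun kw => PySem.Str.isIn kw t) then "Elevation of Privilege"
     else "Tampering")
    = (match PySem.List.min?
          ((strideKeywordTable.filter (fun p => PySem.Str.isIn p.1 t)).map Prod.snd) (fun x => x) with
       | some m => (PySem.List.pyGet? strideCategories m).getD "Tampering"
       | none => "Tampering") := by
  rw [strideKeywordTable_eq, min?_hits (fun kw => PySem.Str.isIn kw t) 0 strideGroups]
  simp only [strideGroups, firstHit]
  split_ifs <;> norm_num [PySem.List.pyGet?, PySem.List.pyIdx?, strideCategories] <;> rfl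

-- ===== VERDICT (by name: the statement is the Claim_ definition above) =====

theorem map_to_stride_py_spec : Claim_equal_map_to_stride_py := by
  intro tc d _
  simp only [Spec_map_to_stride_py, map_to_stride_py, map_to_stride_py_alt]
  rw [main_eq]
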